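-- pv_equiv track=rewrite | github.com/Wellwick/AdventOfCode2020 | day7.py | check_contains_gold
-- ===== SOURCE A (Python) =====
-- def check_contains_gold(contains_gold, recipes, bag):
--     if bag in contains_gold:
--         return contains_gold[bag]
--
--     count = 0
--     # Let's track actual numbers!
--     for i in recipes[bag]:
--         if i == "shiny gold":
--             count += recipes[bag][i]
--         else:
--             count += recipes[bag][i] * check_contains_gold(contains_gold, recipes, i)
--
--     contains_gold[bag] = count
--     return contains_gold[bag]
-- ===== SOURCE B (Python) =====
-- def check_contains_gold(contains_gold, recipes, bag):
--     # Iterative DFS with an explicit stack instead of memoized recursion.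
--     # Fills contains_gold with the same entries (same keys, values, insertion order) as A.
--     stack = [(bag, False)]
--     while stack:
--         b, ready = stack.pop()
--         if b in contains_gold:
--             continue
--         if ready:
--             count = 0
--             for c, m in recipes[b].items():
--                 count += m if c == "shiny gold" else m * contains_gold[c]
--             contains_gold[b] = count
--         else:
--             stack.append((b, True))
--             for c in reversed(recipes[b]):
--                 if c != "shiny gold":
--                     stack.append((c, False))
--     return contains_gold[bag]
-- ===== Notes on version B (the rewrite author's own statement) =====
-- stated objective: alternative
-- what changed: A's memoized recursion is replaced by an iterative depth-first search over an explicit stack of (bag, children-resolved) tasks; B fills the contains_gold cache with the same entries in the same order and returns the same count.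
import Mathlib
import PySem

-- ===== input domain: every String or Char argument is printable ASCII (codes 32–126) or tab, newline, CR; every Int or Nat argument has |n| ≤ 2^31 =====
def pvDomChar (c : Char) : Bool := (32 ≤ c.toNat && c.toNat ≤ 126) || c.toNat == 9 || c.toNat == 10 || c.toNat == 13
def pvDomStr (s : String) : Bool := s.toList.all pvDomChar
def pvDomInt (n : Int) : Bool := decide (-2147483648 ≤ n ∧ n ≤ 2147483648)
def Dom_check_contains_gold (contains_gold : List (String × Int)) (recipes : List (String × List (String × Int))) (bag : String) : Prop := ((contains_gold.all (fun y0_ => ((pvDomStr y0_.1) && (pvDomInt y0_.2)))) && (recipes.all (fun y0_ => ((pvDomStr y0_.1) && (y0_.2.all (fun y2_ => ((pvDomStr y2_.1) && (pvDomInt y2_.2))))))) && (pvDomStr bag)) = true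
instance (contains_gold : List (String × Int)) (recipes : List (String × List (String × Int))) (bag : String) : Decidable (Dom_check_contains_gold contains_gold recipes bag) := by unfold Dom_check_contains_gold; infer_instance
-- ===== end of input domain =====

-- B replaces A's memoized recursion by an iterative DFS over an explicit stack (same return
-- value; B also leaves the same entries in the caller's contains_gold dict, in the same order).
-- Fuel arguments below are a Lean totality device only: they are generous upper bounds on the
-- number of steps, never reached on inputs admitted by Pre_.

-- Both Python parameters are dicts; the association-list arguments are rebuilt as dicts with
-- Python's semantics (duplicate keys: last value wins, first position kept).
def pvCG (contains_gold : List (String × Int)) : PySem.Dict String Int :=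
  PySem.Dict.ofList contains_gold

def pvRC (recipes : List (String × List (String × Int))) : PySem.Dict String (PySem.Dict String Int) :=
  PySem.Dict.ofList (recipes.map (fun p => (p.1, PySem.Dict.ofList p.2)))

-- ===== PORT A =====
-- A's recursion, transliterated: the cache is threaded through; `none` is exactly where the
-- Python raises (KeyError on a missing recipe, or unbounded recursion = fuel exhausted).
mutual
def ArunLoop (fuel : Nat) (cg : PySem.Dict String Int)
    (rc : PySem.Dict String (PySem.Dict String Int)) :
    List (String × Int) → Int → Option (Int × PySem.Dict String Int)
  | [], count => some (count, cg)
  | (i, m) :: rest, count =>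
    if i == "shiny gold" then ArunLoop fuel cg rc rest (count + m)
    else
      match Arun fuel cg rc i with
      | none => none
      | some (v, cg') => ArunLoop fuel cg' rc rest (count + m * v)
termination_by l _ => (fuel, l.length)
decreasing_by all_goals simp_wf; omega

def Arun : Nat → PySem.Dict String Int → PySem.Dict String (PySem.Dict String Int) →
    String → Option (Int × PySem.Dict String Int)
  | 0, _, _, _ => none
  | fuel+1, cg, rc, bag =>
    if cg.contains bag then some (cg.getD bag 0, cg)
    else
      match rc.get? bag with
      | none => none
      | some ch =>
        match ArunLoop fuel cg rc ch.items 0 with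
        | none => none
        | some (count, cg') =>
          let cg2 := cg'.insert bag count
          some (cg2.getD bag 0, cg2)
termination_by fuel _ _ _ => (fuel, 0)
decreasing_by all_goals simp_wf; omega
end

def check_contains_gold (contains_gold : List (String × Int)) (recipes : List (String × List (String × Int))) (bag : String) : Int :=
  match Arun (recipes.length + 2) (pvCG contains_gold) (pvRC recipes) bag with
  | some (v, _) => v
  | none => 0   -- unreached under Pre_: the Python raises exactly here

-- ===== PORT B =====
-- B's sum over a resolved bag's children (`none` = KeyError on contains_gold[c]).
def Bsum (cg : PySem.Dict String Int) (items : List (String × Int)) : Option Int :=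
  items.foldl
    (fun acc? p => acc?.bind (fun acc =>
      if p.1 == "shiny gold" then some (acc + p.2)
      else (cg.get? p.1).map (fun v => acc + p.2 * v)))
    (some 0)

-- B's stack machine: (b, false) = visit b, (b, true) = b's children are resolved.
def Brun : Nat → PySem.Dict String Int → PySem.Dict String (PySem.Dict String Int) →
    List (String × Bool) → Option (PySem.Dict String Int)
  | 0, _, _, _ => none
  | _+1, cg, _, [] => some cg
  | fuel+1, cg, rc, (b, ready) :: stk =>
    if cg.contains b then Brun fuel cg rc stk
    else
      match rc.get? b with
      | none => none
      | some ch =>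
        if ready then
          match Bsum cg ch.items with
          | none => none
          | some count => Brun fuel (cg.insert b count) rc stk
        else
          Brun fuel cg rc
            ((ch.keys.filter (fun c => c != "shiny gold")).map (fun c => (c, false))
              ++ (b, true) :: stk)

-- an upper bound on any recipe's number of children, for the fuel bound
def pvM (rc : PySem.Dict String (PySem.Dict String Int)) : Nat :=
  rc.items.foldl (fun a p => max a p.2.size) 0

def check_contains_gold_alt (contains_gold : List (String × Int)) (recipes : List (String × List (String × Int))) (bag : String) : Int :=
  match Brun ((pvM (pvRC recipes) + 2) ^ ((pvRC recipes).keys.length + 1) + 1)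
      (pvCG contains_gold) (pvRC recipes) [(bag, false)] with
  | some cg' =>
    match cg'.get? bag with
    | some v => v
    | none => 0    -- unreachable: bag is always cached when the stack empties
  | none => 0      -- unreached under Pre_: the Python raises exactly here

-- ===== PRECONDITION & SPEC =====
-- the non-"shiny gold" children A recurses into from an uncached bag b
def pvSuccs (cg : PySem.Dict String Int) (rc : PySem.Dict String (PySem.Dict String Int))
    (b : String) : List String :=
  if cg.contains b then [] else
    match rc.get? b with
    | some ch => ch.keys.filter (fun c => c != "shiny gold")
    | none => []

-- pvOk i = recipe keys whose dependency chains (through uncached bags) resolve within depth i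
def pvOk (cg : PySem.Dict String Int) (rc : PySem.Dict String (PySem.Dict String Int)) :
    Nat → List String
  | 0 => []
  | i+1 => rc.keys.filter
      (fun k => (pvSuccs cg rc k).all
        (fun c => cg.contains c || (pvOk cg rc i).contains c))

-- Pre_: bag is already cached, or bag's own dependency chains resolve (bag has a recipe, every
-- uncached non-gold bag reachable from it has one, and no cycle is reachable through uncached
-- bags) — exactly the inputs on which the Python A returns instead of raising KeyError /
-- RecursionError (depth (pvRC).keys.length reaches the fixpoint of the resolvability iteration).
def Pre_check_contains_gold (contains_gold : List (String × Int)) (recipes : List (String × List (String × Int))) (bag : String) : Prop :=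
  (pvCG contains_gold).contains bag = true ∨
  bag ∈ pvOk (pvCG contains_gold) (pvRC recipes) ((pvRC recipes).keys.length)

instance (contains_gold : List (String × Int)) (recipes : List (String × List (String × Int))) (bag : String) : Decidable (Pre_check_contains_gold contains_gold recipes bag) := by
  unfold Pre_check_contains_gold; infer_instance

def pvWitness_check_contains_gold : (List (String × Int)) × (List (String × List (String × Int))) × String :=
  ([("red", 3)], [("a", [("red", 2), ("shiny gold", 1)]), ("red", [])], "a")

def Spec_check_contains_gold (contains_gold : List (String × Int)) (recipes : List (String × List (String × Int))) (bag : String) (out : Int) : Prop := out = check_contains_gold_alt contains_gold recipes bag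
instance (contains_gold : List (String × Int)) (recipes : List (String × List (String × Int))) (bag : String) (out : Int) : Decidable (Spec_check_contains_gold contains_gold recipes bag out) := by unfold Spec_check_contains_gold; infer_instance

-- ===== CLAIM (what is proved, stated in full; the proofs are below) =====
def Claim_equal_check_contains_gold : Prop := ∀ (contains_gold : List (String × Int)) (recipes : List (String × List (String × Int))) (bag : String), Dom_check_contains_gold contains_gold recipes bag → Pre_check_contains_gold contains_gold recipes bag → Spec_check_contains_gold contains_gold recipes bag (check_contains_gold contains_gold recipes bag)

-- ===== LEMMAS AND PROOFS =====

-- the canonical value of a bag (with respect to the ORIGINAL cache), by bounded unfolding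
def pvGval (cg : PySem.Dict String Int) (rc : PySem.Dict String (PySem.Dict String Int)) :
    Nat → String → Int
  | 0, b => (cg.get? b).getD 0
  | i+1, b =>
    match cg.get? b with
    | some v => v
    | none =>
      match rc.get? b with
      | some ch => ch.items.foldl
          (fun acc p => acc + (if p.1 == "shiny gold" then p.2 else p.2 * pvGval cg rc i p.1)) 0
      | none => 0
termination_by i => i

-- the contribution of a children list under a valuation G
def pvS (G : String → Int) (l : List (String × Int)) : Int :=
  (l.map (fun p => if p.1 == "shiny gold" then p.2 else p.2 * G p.1)).sum

-- cache invariant: values agree with G, extends the original cache, keys unique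
def pvGood (G : String → Int) (cg : PySem.Dict String Int) : Prop :=
  ∀ k v, cg.get? k = some v → v = G k

def pvExt (cg cg' : PySem.Dict String Int) : Prop :=
  ∀ k v, cg.get? k = some v → cg'.get? k = some v

def pvInv (G : String → Int) (cg0 cg : PySem.Dict String Int) : Prop :=
  pvGood G cg ∧ pvExt cg0 cg ∧ cg.keys.Nodup

def pvCost (M i : Nat) : Nat := (M + 2) ^ (i + 1)

theorem pvExt_refl (cg : PySem.Dict String Int) : pvExt cg cg := fun _ _ h => h

theorem pvExt_trans {a b c : PySem.Dict String Int} (h1 : pvExt a b) (h2 : pvExt b c) :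
    pvExt a c := fun k v h => h2 k v (h1 k v h)

theorem pvExt_contains {a b : PySem.Dict String Int} (h : pvExt a b) {k : String}
    (hk : a.contains k = true) : b.contains k = true := by
  rw [PySem.Dict.contains_eq_isSome_get?] at hk ⊢
  obtain ⟨v, hv⟩ := Option.isSome_iff_exists.mp hk
  simp [h k v hv]

theorem pvExt_not_contains {a b : PySem.Dict String Int} (h : pvExt a b) {k : String}
    (hk : b.contains k = false) : a.contains k = false := by
  by_contra hc
  have : a.contains k = true := by revert hc; cases a.contains k <;> simp
  rw [pvExt_contains h this] at hk
  cases hk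

theorem pvGood_get? {G : String → Int} {cg : PySem.Dict String Int} {b : String}
    (hg : pvGood G cg) (hb : cg.contains b = true) : cg.get? b = some (G b) := by
  rw [PySem.Dict.contains_eq_isSome_get?] at hb
  obtain ⟨v, hv⟩ := Option.isSome_iff_exists.mp hb
  rw [hv, hg b v hv]

theorem pvInv_insert {G : String → Int} {cg0 cg : PySem.Dict String Int} {b : String} {c : Int}
    (hI : pvInv G cg0 cg) (hc : c = G b) :
    pvInv G cg0 (cg.insert b c) ∧ pvExt cg (cg.insert b c) := by
  obtain ⟨hg, he, hnd⟩ := hI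
  have hext : pvExt cg (cg.insert b c) := by
    intro k v hv
    rw [PySem.Dict.get?_insert]
    split
    · next hkb => subst hkb; rw [hg k v hv, ← hc]
    · exact hv
  refine ⟨⟨?_, pvExt_trans he hext, PySem.Dict.nodup_keys_insert _ _ _ hnd⟩, hext⟩
  intro k v hv
  rw [PySem.Dict.get?_insert] at hv
  split at hv
  · next hkb => subst hkb; cases hv; exact hc
  · exact hg k v hv

-- inserting the value a Nodup good cache already holds is a no-op
theorem pvInsert_self_eq {G : String → Int} {cg : PySem.Dict String Int} {b : String}
    (hnd : cg.keys.Nodup) (hg : pvGood G cg) (hb : cg.contains b = true) :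
    cg.insert b (G b) = cg := by
  apply PySem.Dict.ext
  rw [PySem.Dict.items_insert_of_contains _ _ hb]
  conv_rhs => rw [← List.map_id cg.items]
  apply List.map_congr_left
  intro p hp
  by_cases hpb : (p.1 == b) = true
  · have hb' : p.1 = b := by simpa using hpb
    have hq := PySem.Dict.get?_of_mem_items cg (by simpa using hp) hnd
    have hv := hg p.1 p.2 hq
    simp [← hb', ← hv]
  · simp [hpb]

theorem pvGval_cached {cg : PySem.Dict String Int} {rc : PySem.Dict String (PySem.Dict String Int)}
    {b : String} (hb : cg.contains b = true) (j : Nat) :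
    pvGval cg rc j b = (cg.get? b).getD 0 := by
  cases j with
  | zero => simp [pvGval]
  | succ j =>
    rw [PySem.Dict.contains_eq_isSome_get?] at hb
    obtain ⟨v, hv⟩ := Option.isSome_iff_exists.mp hb
    simp [pvGval, hv]

theorem pvOk_mem_iff {cg : PySem.Dict String Int} {rc : PySem.Dict String (PySem.Dict String Int)}
    {b : String} {i : Nat} :
    b ∈ pvOk cg rc (i + 1) ↔ b ∈ rc.keys ∧
      ∀ c ∈ pvSuccs cg rc b, cg.contains c = true ∨ c ∈ pvOk cg rc i := by
  simp [pvOk, List.mem_filter, List.all_eq_true]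

theorem pvSuccs_mem {cg : PySem.Dict String Int} {rc : PySem.Dict String (PySem.Dict String Int)}
    {b : String} {ch : PySem.Dict String Int} {p : String × Int}
    (hnc : cg.contains b = false) (hch : rc.get? b = some ch) (hp : p ∈ ch.items)
    (hg : (p.1 == "shiny gold") = false) : p.1 ∈ pvSuccs cg rc b := by
  have hk : p.1 ∈ ch.keys := by
    simpa [PySem.Dict.keys] using List.mem_map_of_mem (f := Prod.fst) hp
  simp [pvSuccs, hnc, hch, List.mem_filter, hk]
  simpa using hg

theorem pvGval_stab {cg : PySem.Dict String Int} {rc : PySem.Dict String (PySem.Dict String Int)} :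
    ∀ i, ∀ b ∈ pvOk cg rc i, ∀ j, i ≤ j → pvGval cg rc j b = pvGval cg rc i b := by
  intro i
  induction i with
  | zero => intro b hb; simp [pvOk] at hb
  | succ i ih =>
    intro b hb j hj
    obtain ⟨hbk, hsucc⟩ := pvOk_mem_iff.mp hb
    obtain ⟨j, rfl⟩ : ∃ j', j = j' + 1 := ⟨j - 1, by omega⟩
    cases hv : cg.get? b with
    | some v => simp [pvGval, hv]
    | none =>
      have hnc : cg.contains b = false := (PySem.Dict.get?_eq_none_iff_contains _ _).mp hv
      have hct : rc.contains b = true := (PySem.Dict.contains_iff_mem_keys _ _).mpr hbk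
      rw [PySem.Dict.contains_eq_isSome_get?] at hct
      obtain ⟨ch, hch⟩ := Option.isSome_iff_exists.mp hct
      simp only [pvGval, hv, hch]
      rw [PySem.List.foldl_add, PySem.List.foldl_add]
      congr 1
      apply congrArg
      apply List.map_congr_left
      intro p hp
      by_cases hg : (p.1 == "shiny gold") = true
      · simp [hg]
      · have hs := pvSuccs_mem hnc hch hp (by simpa using hg)
        rcases hsucc p.1 hs with hc | hok
        · simp [hg, pvGval_cached hc]
        · simp [hg, ih p.1 hok j (by omega)]

theorem pvGval_sum {cg : PySem.Dict String Int} {rc : PySem.Dict String (PySem.Dict String Int)}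
    {N i : Nat} {b : String} {ch : PySem.Dict String Int}
    (hiN : i + 1 ≤ N) (hnc : cg.contains b = false) (hok : b ∈ pvOk cg rc (i + 1))
    (hch : rc.get? b = some ch) :
    pvGval cg rc N b = pvS (pvGval cg rc N) ch.items := by
  obtain ⟨hbk, hsucc⟩ := pvOk_mem_iff.mp hok
  have hv : cg.get? b = none := (PySem.Dict.get?_eq_none_iff_contains _ _).mpr hnc
  rw [pvGval_stab (i + 1) b hok N hiN]
  simp only [pvGval, hv, hch]
  rw [PySem.List.foldl_add, zero_add, pvS]
  apply congrArg
  apply List.map_congr_left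
  intro p hp
  by_cases hg : (p.1 == "shiny gold") = true
  · simp [hg]
  · have hs := pvSuccs_mem hnc hch hp (by simpa using hg)
    rcases hsucc p.1 hs with hc | hok'
    · simp [hg, pvGval_cached hc]
    · simp [hg, pvGval_stab i p.1 hok' N (by omega)]

-- A-side correctness: the memoized recursion returns the canonical value and keeps the invariant
-- A-side loop lemma, given the A-side statement at level i
theorem pvLAL (cg0 : PySem.Dict String Int) (rc : PySem.Dict String (PySem.Dict String Int))
    (N i : Nat)
    (hA : ∀ b cg, pvInv (pvGval cg0 rc N) cg0 cg →
      (cg.contains b = true ∨ b ∈ pvOk cg0 rc i) →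
      ∀ f, i + 1 ≤ f →
      ∃ cg', Arun f cg rc b = some (pvGval cg0 rc N b, cg') ∧
        pvInv (pvGval cg0 rc N) cg0 cg' ∧ pvExt cg cg' ∧ cg'.contains b = true) :
    ∀ l cg count, pvInv (pvGval cg0 rc N) cg0 cg →
      (∀ p ∈ l, (p.1 == "shiny gold") = true ∨ cg0.contains p.1 = true ∨ p.1 ∈ pvOk cg0 rc i) →
      ∀ f, i + 1 ≤ f →
      ∃ cg', ArunLoop f cg rc l count = some (count + pvS (pvGval cg0 rc N) l, cg') ∧
        pvInv (pvGval cg0 rc N) cg0 cg' ∧ pvExt cg cg' := by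
  intro l
  induction l with
  | nil =>
    intro cg count hI _ f _
    exact ⟨cg, by simp [ArunLoop, pvS], hI, pvExt_refl cg⟩
  | cons p t ih =>
    intro cg count hI hl f hf
    obtain ⟨c, m⟩ := p
    have htl : ∀ p ∈ t, (p.1 == "shiny gold") = true ∨ cg0.contains p.1 = true ∨
        p.1 ∈ pvOk cg0 rc i := fun q hq => hl q (List.mem_cons_of_mem _ hq)
    by_cases hg : (c == "shiny gold") = true
    · obtain ⟨cg', heq, hI', hext⟩ := ih cg (count + m) hI htl f hf
      refine ⟨cg', ?_, hI', hext⟩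
      have hg' : c = "shiny gold" := by simpa using hg
      subst hg'
      simp only [ArunLoop, hg, if_true, heq, Option.some.injEq, Prod.mk.injEq]
      refine ⟨?_, trivial⟩
      simp [pvS]
      ring
    · have hcase : cg.contains c = true ∨ c ∈ pvOk cg0 rc i := by
        rcases hl (c, m) List.mem_cons_self with h | h | h
        · exact absurd h hg
        · exact Or.inl (pvExt_contains hI.2.1 h)
        · exact Or.inr h
      obtain ⟨cg1, hAeq, hI1, hext1, _⟩ := hA c cg hI hcase f hf
      obtain ⟨cg2, heq2, hI2, hext2⟩ :=
        ih cg1 (count + m * pvGval cg0 rc N c) hI1 htl f hf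
      refine ⟨cg2, ?_, hI2, pvExt_trans hext1 hext2⟩
      have hg' : ¬ c = "shiny gold" := by simpa using hg
      simp only [ArunLoop, hg, Bool.false_eq_true, if_false, hAeq, heq2,
        Option.some.injEq, Prod.mk.injEq]
      refine ⟨?_, trivial⟩
      simp [pvS, hg']
      ring

theorem pvLA_cached {cg0 cg : PySem.Dict String Int}
    {rc : PySem.Dict String (PySem.Dict String Int)} {N : Nat} {b : String}
    (hI : pvInv (pvGval cg0 rc N) cg0 cg) (hc : cg.contains b = true)
    (f : Nat) (hf : 1 ≤ f) :
    ∃ cg', Arun f cg rc b = some (pvGval cg0 rc N b, cg') ∧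
      pvInv (pvGval cg0 rc N) cg0 cg' ∧ pvExt cg cg' ∧ cg'.contains b = true := by
  obtain ⟨f, rfl⟩ : ∃ x, f = x + 1 := ⟨f - 1, by omega⟩
  refine ⟨cg, ?_, hI, pvExt_refl cg, hc⟩
  simp only [Arun, if_pos hc]
  rw [PySem.Dict.getD_eq_get?_getD, pvGood_get? hI.1 hc]
  rfl

theorem pvLA (cg0 : PySem.Dict String Int) (rc : PySem.Dict String (PySem.Dict String Int))
    (N : Nat) : ∀ i, i ≤ N →
    (∀ b cg, pvInv (pvGval cg0 rc N) cg0 cg →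
      (cg.contains b = true ∨ b ∈ pvOk cg0 rc i) →
      ∀ f, i + 1 ≤ f →
      ∃ cg', Arun f cg rc b = some (pvGval cg0 rc N b, cg') ∧
        pvInv (pvGval cg0 rc N) cg0 cg' ∧ pvExt cg cg' ∧ cg'.contains b = true) := by
  intro i
  induction i with
  | zero =>
    intro _ b cg hI hb f hf
    rcases hb with hc | hok
    · exact pvLA_cached hI hc f (by omega)
    · simp [pvOk] at hok
  | succ i ih =>
    intro hiN b cg hI hb f hf
    by_cases hc : cg.contains b = true
    · exact pvLA_cached hI hc f (by omega)
    · have hcf : cg.contains b = false := by revert hc; cases cg.contains b <;> simp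
      rcases hb with hb' | hok
      · rw [hb'] at hcf; cases hcf
      · obtain ⟨hbk, hsucc⟩ := pvOk_mem_iff.mp hok
        have hnc0 : cg0.contains b = false := pvExt_not_contains hI.2.1 hcf
        have hct : rc.contains b = true := (PySem.Dict.contains_iff_mem_keys _ _).mpr hbk
        rw [PySem.Dict.contains_eq_isSome_get?] at hct
        obtain ⟨ch, hch⟩ := Option.isSome_iff_exists.mp hct
        obtain ⟨f, rfl⟩ : ∃ x, f = x + 1 := ⟨f - 1, by omega⟩
        have hchild : ∀ p ∈ ch.items, (p.1 == "shiny gold") = true ∨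
            cg0.contains p.1 = true ∨ p.1 ∈ pvOk cg0 rc i := by
          intro p hp
          by_cases hg : (p.1 == "shiny gold") = true
          · exact Or.inl hg
          · exact Or.inr (hsucc p.1 (pvSuccs_mem hnc0 hch hp (by simpa using hg)))
        obtain ⟨cg1, heq, hI1, hext1⟩ :=
          pvLAL cg0 rc N i (ih (by omega)) ch.items cg 0 hI hchild f (by omega)
        have hval : pvGval cg0 rc N b = pvS (pvGval cg0 rc N) ch.items :=
          pvGval_sum hiN hnc0 hok hch
        obtain ⟨hI2, hext2⟩ :=
          pvInv_insert (c := 0 + pvS (pvGval cg0 rc N) ch.items) hI1 (by rw [hval]; ring)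
        refine ⟨cg1.insert b (0 + pvS (pvGval cg0 rc N) ch.items), ?_, hI2,
          pvExt_trans hext1 hext2, PySem.Dict.contains_insert_self _ _ _⟩
        simp only [Arun, hcf, Bool.false_eq_true, if_false, hch, heq]
        rw [PySem.Dict.getD_eq_get?_getD, PySem.Dict.get?_insert_self]
        simp only [Option.getD_some]
        rw [hval]
        norm_num



theorem Brun_mono (rc : PySem.Dict String (PySem.Dict String Int)) :
    ∀ g (cg : PySem.Dict String Int) stk r, Brun g cg rc stk = some r →
      ∀ g₂, g ≤ g₂ → Brun g₂ cg rc stk = some r := by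
  intro g
  induction g with
  | zero => intro cg stk r h; simp [Brun] at h
  | succ g ih =>
    intro cg stk r h g₂ hg
    obtain ⟨g₂, rfl⟩ : ∃ x, g₂ = x + 1 := ⟨g₂ - 1, by omega⟩
    cases stk with
    | nil => simpa [Brun] using h
    | cons p t =>
      obtain ⟨b, ready⟩ := p
      simp only [Brun] at h ⊢
      by_cases hc : cg.contains b = true
      · rw [if_pos hc] at h ⊢
        exact ih _ _ _ h _ (by omega)
      · rw [if_neg hc] at h ⊢
        cases hrc : rc.get? b with
        | none => rw [hrc] at h; cases h
        | some ch =>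
          simp only [hrc] at h ⊢
          cases ready with
          | false =>
            simp only [Bool.false_eq_true, if_false] at h ⊢
            exact ih _ _ _ h _ (by omega)
          | true =>
            simp only [if_true] at h ⊢
            cases hbs : Bsum cg ch.items with
            | none => rw [hbs] at h; cases h
            | some count =>
              simp only [hbs] at h ⊢
              exact ih _ _ _ h _ (by omega)

theorem pvBsum_aux {G : String → Int} {cg : PySem.Dict String Int} :
    ∀ l a, pvGood G cg → (∀ p ∈ l, (p.1 == "shiny gold") = true ∨ cg.contains p.1 = true) →
      l.foldl
        (fun acc? p => acc?.bind (fun acc =>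
          if p.1 == "shiny gold" then some (acc + p.2)
          else (cg.get? p.1).map (fun v => acc + p.2 * v)))
        (some a) = some (a + pvS G l) := by
  intro l
  induction l with
  | nil => intro a _ _; simp [pvS]
  | cons p t ih =>
    intro a hg hl
    simp only [List.foldl_cons, Option.bind_some]
    by_cases hp : (p.1 == "shiny gold") = true
    · have hp' : p.1 = "shiny gold" := by simpa using hp
      rw [if_pos hp, ih (a + p.2) hg (fun q hq => hl q (List.mem_cons_of_mem _ hq))]
      simp [pvS, hp']
      ring
    · rcases hl p (List.mem_cons_self) with h | h
      · exact absurd h hp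
      · rw [if_neg (by simp_all), pvGood_get? hg h]
        simp only [Option.map_some]
        have hp' : ¬ p.1 = "shiny gold" := by simpa using hp
        rw [ih (a + p.2 * G p.1) hg (fun q hq => hl q (List.mem_cons_of_mem _ hq))]
        simp [pvS, hp']
        ring

theorem pvBsum_spec {G : String → Int} {cg : PySem.Dict String Int} :
    ∀ l, pvGood G cg → (∀ p ∈ l, (p.1 == "shiny gold") = true ∨ cg.contains p.1 = true) →
      Bsum cg l = some (pvS G l) := by
  intro l hg hl
  have := pvBsum_aux l 0 hg hl
  simpa [Bsum] using this

theorem pvCost_pos (M i : Nat) : 1 ≤ pvCost M i := Nat.one_le_pow _ _ (by omega)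

theorem pvFoldlMax_init (f : (String × PySem.Dict String Int) → Nat) :
    ∀ (l : List (String × PySem.Dict String Int)) (a : Nat),
      a ≤ l.foldl (fun a q => max a (f q)) a := by
  intro l
  induction l with
  | nil => simp
  | cons q t ih => intro a; exact le_trans (le_max_left a (f q)) (ih _)

theorem pvFoldlMax_mem (f : (String × PySem.Dict String Int) → Nat) :
    ∀ (l : List (String × PySem.Dict String Int)) (a : Nat) (p : _), p ∈ l →
      f p ≤ l.foldl (fun a q => max a (f q)) a := by
  intro l
  induction l with
  | nil => simp
  | cons q t ih =>
    intro a p hp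
    rcases List.mem_cons.mp hp with h | h
    · subst h; exact le_trans (le_max_right a (f p)) (pvFoldlMax_init f t _)
    · exact ih _ p h

theorem pvM_bound {rc : PySem.Dict String (PySem.Dict String Int)} {b : String}
    {ch : PySem.Dict String Int} (h : rc.get? b = some ch) : ch.size ≤ pvM rc := by
  have hm := PySem.Dict.mem_items_of_get?_eq_some rc h
  exact pvFoldlMax_mem (fun p => p.2.size) rc.items 0 (b, ch) hm

-- B-side loop lemma, given the B-side statement at level i
theorem pvLBL (cg0 : PySem.Dict String Int) (rc : PySem.Dict String (PySem.Dict String Int))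
    (N i : Nat)
    (hB : ∀ b cg, pvInv (pvGval cg0 rc N) cg0 cg →
      (cg.contains b = true ∨ b ∈ pvOk cg0 rc i) →
      ∃ cg', pvInv (pvGval cg0 rc N) cg0 cg' ∧ pvExt cg cg' ∧
        cg'.get? b = some (pvGval cg0 rc N b) ∧
        ∀ stk g r, Brun g cg' rc stk = some r →
          ∀ g₂, g + pvCost (pvM rc) i ≤ g₂ → Brun g₂ cg rc ((b, false) :: stk) = some r) :
    ∀ (l : List String) cg, pvInv (pvGval cg0 rc N) cg0 cg →
      (∀ c ∈ l, cg.contains c = true ∨ c ∈ pvOk cg0 rc i) →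
      ∃ cg', pvInv (pvGval cg0 rc N) cg0 cg' ∧ pvExt cg cg' ∧
        (∀ c ∈ l, cg'.contains c = true) ∧
        ∀ stk g r, Brun g cg' rc stk = some r →
          ∀ g₂, g + l.length * pvCost (pvM rc) i ≤ g₂ →
            Brun g₂ cg rc (l.map (fun c => (c, false)) ++ stk) = some r := by
  intro l
  induction l with
  | nil =>
    intro cg hI _
    refine ⟨cg, hI, pvExt_refl cg, by simp, ?_⟩
    intro stk g r h g₂ hg₂
    simpa using Brun_mono rc g cg stk r h g₂ (by omega)
  | cons c t ih =>
    intro cg hI hl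
    obtain ⟨cg1, hI1, hext1, hget1, hcont1⟩ := hB c cg hI (hl c List.mem_cons_self)
    have htl : ∀ d ∈ t, cg1.contains d = true ∨ d ∈ pvOk cg0 rc i := by
      intro d hd
      rcases hl d (List.mem_cons_of_mem _ hd) with h | h
      · exact Or.inl (pvExt_contains hext1 h)
      · exact Or.inr h
    obtain ⟨cg2, hI2, hext2, hallc, hcont2⟩ := ih cg1 hI1 htl
    refine ⟨cg2, hI2, pvExt_trans hext1 hext2, ?_, ?_⟩
    · intro d hd
      rcases List.mem_cons.mp hd with rfl | hd
      · refine pvExt_contains hext2 ?_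
        rw [PySem.Dict.contains_eq_isSome_get?, hget1]
        rfl
      · exact hallc d hd
    · intro stk g r h g₂ hg₂
      have step2 := hcont2 stk g r h (g + t.length * pvCost (pvM rc) i) (le_refl _)
      have harith : (g + t.length * pvCost (pvM rc) i) + pvCost (pvM rc) i ≤ g₂ := by
        simp only [List.length_cons, Nat.succ_mul] at hg₂
        omega
      have step1 := hcont1 (t.map (fun c => (c, false)) ++ stk) _ r step2 g₂ harith
      simpa using step1

-- arithmetic for the fuel bound of one expansion step
theorem pvCost_step (M i L : Nat) (hL : L ≤ M) :
    2 + L * pvCost M i ≤ pvCost M (i + 1) := by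
  have h1 : 1 ≤ (M + 2) ^ (i + 1) := Nat.one_le_pow _ _ (by omega)
  have h2 : L * (M + 2) ^ (i + 1) ≤ M * (M + 2) ^ (i + 1) :=
    Nat.mul_le_mul_right _ hL
  have h5 : pvCost M (i + 1) = M * (M + 2) ^ (i + 1) + 2 * (M + 2) ^ (i + 1) := by
    simp only [pvCost]
    ring
  simp only [pvCost] at *
  omega

-- B-side correctness: the stack machine resolves b, keeps the invariant, and its step count is
-- bounded by pvCost
theorem pvLB_cached {cg0 cg : PySem.Dict String Int}
    {rc : PySem.Dict String (PySem.Dict String Int)} {N i : Nat} {b : String}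
    (hI : pvInv (pvGval cg0 rc N) cg0 cg) (hc : cg.contains b = true) :
    ∃ cg', pvInv (pvGval cg0 rc N) cg0 cg' ∧ pvExt cg cg' ∧
      cg'.get? b = some (pvGval cg0 rc N b) ∧
      ∀ stk g r, Brun g cg' rc stk = some r →
        ∀ g₂, g + pvCost (pvM rc) i ≤ g₂ → Brun g₂ cg rc ((b, false) :: stk) = some r := by
  refine ⟨cg, hI, pvExt_refl cg, pvGood_get? hI.1 hc, ?_⟩
  intro stk g r h g₂ hg₂
  have hpos := pvCost_pos (pvM rc) i
  obtain ⟨g₂, rfl⟩ : ∃ x, g₂ = x + 1 := ⟨g₂ - 1, by omega⟩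
  simp only [Brun, if_pos hc]
  exact Brun_mono rc g cg stk r h g₂ (by omega)

theorem pvLB (cg0 : PySem.Dict String Int) (rc : PySem.Dict String (PySem.Dict String Int))
    (N : Nat) : ∀ i, i ≤ N →
    (∀ b cg, pvInv (pvGval cg0 rc N) cg0 cg →
      (cg.contains b = true ∨ b ∈ pvOk cg0 rc i) →
      ∃ cg', pvInv (pvGval cg0 rc N) cg0 cg' ∧ pvExt cg cg' ∧
        cg'.get? b = some (pvGval cg0 rc N b) ∧
        ∀ stk g r, Brun g cg' rc stk = some r →
          ∀ g₂, g + pvCost (pvM rc) i ≤ g₂ → Brun g₂ cg rc ((b, false) :: stk) = some r) := by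
  intro i
  induction i with
  | zero =>
    intro _ b cg hI hb
    rcases hb with hc | hok
    · exact pvLB_cached hI hc
    · simp [pvOk] at hok
  | succ i ih =>
    intro hiN b cg hI hb
    by_cases hc : cg.contains b = true
    · exact pvLB_cached hI hc
    · have hcf : cg.contains b = false := by revert hc; cases cg.contains b <;> simp
      rcases hb with hb' | hok
      · rw [hb'] at hcf; cases hcf
      · obtain ⟨hbk, hsucc⟩ := pvOk_mem_iff.mp hok
        have hnc0 : cg0.contains b = false := pvExt_not_contains hI.2.1 hcf
        have hct : rc.contains b = true := (PySem.Dict.contains_iff_mem_keys _ _).mpr hbk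
        rw [PySem.Dict.contains_eq_isSome_get?] at hct
        obtain ⟨ch, hch⟩ := Option.isSome_iff_exists.mp hct
        have hsl : pvSuccs cg0 rc b = ch.keys.filter (fun c => c != "shiny gold") := by
          simp [pvSuccs, hnc0, hch]
        have hltl : ∀ c ∈ ch.keys.filter (fun c => c != "shiny gold"),
            cg.contains c = true ∨ c ∈ pvOk cg0 rc i := by
          intro c hcmem
          rcases hsucc c (hsl ▸ hcmem) with h | h
          · exact Or.inl (pvExt_contains hI.2.1 h)
          · exact Or.inr h
        obtain ⟨cg1, hI1, hext1, hallc, hcont⟩ :=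
          pvLBL cg0 rc N i (ih (by omega)) (ch.keys.filter (fun c => c != "shiny gold")) cg
            hI hltl
        have hval : pvGval cg0 rc N b = pvS (pvGval cg0 rc N) ch.items :=
          pvGval_sum hiN hnc0 hok hch
        obtain ⟨hI', hext'⟩ :=
          pvInv_insert (c := pvS (pvGval cg0 rc N) ch.items) hI1 hval.symm
        refine ⟨cg1.insert b (pvS (pvGval cg0 rc N) ch.items), hI', pvExt_trans hext1 hext',
          ?_, ?_⟩
        · rw [PySem.Dict.get?_insert_self, hval]
        · intro stk g r h g₂ hg₂
          have hdone : Brun (g + 1) cg1 rc ((b, true) :: stk) = some r := by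
            simp only [Brun]
            by_cases hc1 : cg1.contains b = true
            · rw [if_pos hc1]
              have hno : cg1.insert b (pvS (pvGval cg0 rc N) ch.items) = cg1 := by
                rw [← hval]
                exact pvInsert_self_eq hI1.2.2 hI1.1 hc1
              rw [← hno]
              exact h
            · have hcf1 : cg1.contains b = false := by revert hc1; cases cg1.contains b <;> simp
              rw [if_neg (by simp [hcf1])]
              simp only [hch, if_true]
              have hbs : Bsum cg1 ch.items = some (pvS (pvGval cg0 rc N) ch.items) := by
                apply pvBsum_spec ch.items hI1.1
                intro p hp
                by_cases hg : (p.1 == "shiny gold") = true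
                · exact Or.inl hg
                · exact Or.inr (hallc p.1 (hsl ▸ pvSuccs_mem hnc0 hch hp (by simpa using hg)))
              rw [hbs]
              exact h
          have hmid := hcont ((b, true) :: stk) (g + 1) r hdone
            (g + 1 + (ch.keys.filter (fun c => c != "shiny gold")).length * pvCost (pvM rc) i)
            (le_refl _)
          have hLM : (ch.keys.filter (fun c => c != "shiny gold")).length ≤ pvM rc := by
            have h1 : (ch.keys.filter (fun c => c != "shiny gold")).length ≤ ch.keys.length :=
              List.length_filter_le _ _
            have h2 : ch.keys.length = ch.size := by
              simp [PySem.Dict.keys, PySem.Dict.size]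
            have h3 := pvM_bound hch
            omega
          have hstep := pvCost_step (pvM rc) i
            ((ch.keys.filter (fun c => c != "shiny gold")).length) hLM
          have hpos := pvCost_pos (pvM rc) (i + 1)
          obtain ⟨g₂, rfl⟩ : ∃ x, g₂ = x + 1 := ⟨g₂ - 1, by omega⟩
          simp only [Brun, hcf, Bool.false_eq_true, if_false, hch]
          exact Brun_mono rc _ _ _ _ hmid g₂ (by omega)


theorem pvItemsLen_foldl (ν : Type) :
    ∀ (l : List (String × ν)) (d : PySem.Dict String ν),
      ((l.foldl (fun d p => d.insert p.1 p.2) d).items.length ≤ d.items.length + l.length) := by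
  intro l
  induction l with
  | nil => simp
  | cons p t ih =>
    intro d
    simp only [List.foldl_cons, List.length_cons]
    refine le_trans (ih _) ?_
    have : (d.insert p.1 p.2).items.length ≤ d.items.length + 1 := by
      rw [PySem.Dict.items_insert]
      split <;> simp
    omega

theorem pvRC_keys_le (recipes : List (String × List (String × Int))) :
    (pvRC recipes).keys.length ≤ recipes.length := by
  have hof : pvRC recipes =
      (recipes.map (fun p => (p.1, PySem.Dict.ofList p.2))).foldl
        (fun d p => d.insert p.1 p.2) PySem.Dict.empty := rfl
  rw [hof, PySem.Dict.keys, List.length_map]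
  have h2 := pvItemsLen_foldl (PySem.Dict String Int)
    (recipes.map (fun p => (p.1, PySem.Dict.ofList p.2))) PySem.Dict.empty
  simp only [List.length_map] at h2 ⊢
  simpa [PySem.Dict.empty] using h2

-- ===== VERDICT (by name: the statement is the Claim_ definition above) =====
theorem check_contains_gold_spec : Claim_equal_check_contains_gold := by
  intro cgl rcl bag _ hpre
  have hnd0 : (pvCG cgl).keys.Nodup := PySem.Dict.nodup_keys_ofList _
  have hgood0 : pvGood (pvGval (pvCG cgl) (pvRC rcl) ((pvRC rcl).keys.length)) (pvCG cgl) := by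
    intro k v hv
    have hc : (pvCG cgl).contains k = true := by
      rw [PySem.Dict.contains_eq_isSome_get?, hv]; rfl
    rw [pvGval_cached hc, hv]
    rfl
  have hI0 : pvInv (pvGval (pvCG cgl) (pvRC rcl) ((pvRC rcl).keys.length)) (pvCG cgl)
      (pvCG cgl) := ⟨hgood0, pvExt_refl _, hnd0⟩
  obtain ⟨cgA, hAeq, _, _, _⟩ :=
    pvLA (pvCG cgl) (pvRC rcl) ((pvRC rcl).keys.length) ((pvRC rcl).keys.length)
      (le_refl _) bag (pvCG cgl) hI0 hpre (rcl.length + 2)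
      (by have := pvRC_keys_le rcl; omega)
  obtain ⟨cgB, _, _, hgetB, hcont⟩ :=
    pvLB (pvCG cgl) (pvRC rcl) ((pvRC rcl).keys.length) ((pvRC rcl).keys.length)
      (le_refl _) bag (pvCG cgl) hI0 hpre
  have hbase : Brun 1 cgB (pvRC rcl) [] = some cgB := by simp [Brun]
  have hrun := hcont [] 1 cgB hbase ((pvM (pvRC rcl) + 2) ^ ((pvRC rcl).keys.length + 1) + 1)
    (by simp [pvCost]; omega)
  unfold Spec_check_contains_gold check_contains_gold check_contains_gold_alt
  rw [hAeq, hrun]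
  simp only [hgetB]
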